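-- pv_equiv track=rewrite | github.com/ramuuns/aoc | 2024/day22.py | gen_sequences
-- ===== SOURCE A (Python) =====
-- MAX_MASK = 16777216 - 1
--
-- def gen_sequences(number, times, all_sequences):
--     s1, s2, s3, s4 = (0, 0, 0, 0)
--     ret = {}
--     i = 0
--     while times > 0:
--         i+=1
--         times -= 1
--         before = number % 10
--         number = (number ^ (number <<  6)) & MAX_MASK
--         number = (number ^ (number >>  5)) & MAX_MASK
--         number = (number ^ (number << 11)) & MAX_MASK
--         s4 = s3
--         s3 = s2
--         s2 = s1
--         s1 = (number  % 10) - before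
--         if i > 3:
--             if (s4, s3, s2, s1) not in ret:
--                 ret[(s4, s3, s2, s1)] = number % 10
--                 all_sequences.add((s1,s2,s3,s4))
--     return ret
-- ===== SOURCE B (Python) =====
-- MAX_MASK = 16777216 - 1
--
-- def _step(n):
--     n = (n ^ (n << 6)) & MAX_MASK
--     n = (n ^ (n >> 5)) & MAX_MASK
--     n = (n ^ (n << 11)) & MAX_MASK
--     return n
--
-- def gen_sequences(number, times, all_sequences):
--     # Phase 1: precompute the whole price series.
--     prices = [number % 10]
--     n = number
--     for _ in range(times):
--         n = _step(n)
--         prices.append(n % 10)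
--     # Phase 2: consecutive diffs, then slide a 4-wide window over them.
--     diffs = [b - a for a, b in zip(prices, prices[1:])]
--     ret = {}
--     for t, p in zip(zip(diffs, diffs[1:], diffs[2:], diffs[3:]), prices[4:]):
--         if t not in ret:
--             ret[t] = p
--             all_sequences.add((t[3], t[2], t[1], t[0]))
--     return ret
-- ===== Notes on version B (the rewrite author's own statement) =====
-- stated objective: alternative
-- what changed: Replaces the single stateful while-loop that threads four shift-register variables s1..s4 with a three-phase pipeline: precompute the full price series, derive the consecutive-diff list with zip, then slide a zip-built 4-wide window over the diffs paired with the prices to fill the dict.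
import Mathlib
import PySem

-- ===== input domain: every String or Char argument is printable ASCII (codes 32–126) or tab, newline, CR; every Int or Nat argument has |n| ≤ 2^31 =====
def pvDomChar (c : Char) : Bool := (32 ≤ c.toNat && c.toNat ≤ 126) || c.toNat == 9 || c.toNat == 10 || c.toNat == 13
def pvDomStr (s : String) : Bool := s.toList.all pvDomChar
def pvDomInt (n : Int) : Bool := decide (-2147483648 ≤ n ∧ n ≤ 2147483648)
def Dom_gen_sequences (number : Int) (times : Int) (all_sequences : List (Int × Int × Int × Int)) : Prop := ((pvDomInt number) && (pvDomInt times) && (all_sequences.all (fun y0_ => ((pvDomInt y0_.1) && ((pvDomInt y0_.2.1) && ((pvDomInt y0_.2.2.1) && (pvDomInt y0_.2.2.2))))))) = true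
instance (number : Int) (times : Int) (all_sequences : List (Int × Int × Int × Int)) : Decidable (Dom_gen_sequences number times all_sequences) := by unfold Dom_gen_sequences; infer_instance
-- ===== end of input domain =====

-- B re-decomposes A's stateful while-loop as precompute-prices → diffs → sliding 4-window; equivalence
-- is about the RETURN value only (both Pythons additionally add the same reversed tuples to all_sequences).

-- ===== PORT A =====
def pvMaxMask : Int := 16777216 - 1

-- A's while-loop, one recursive call per iteration; state exactly A's variables.
def pvLoopA (times i number s1 s2 s3 s4 : Int)
    (ret : PySem.Dict (Int × Int × Int × Int) Int) : PySem.Dict (Int × Int × Int × Int) Int :=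
  if _h : times > 0 then
    let i' := i + 1
    let before := PySem.Int.mod number 10
    let n1 := PySem.Int.band (PySem.Int.bxor number (number <<< (6 : Nat))) pvMaxMask
    let n2 := PySem.Int.band (PySem.Int.bxor n1 (n1 >>> (5 : Nat))) pvMaxMask
    let n3 := PySem.Int.band (PySem.Int.bxor n2 (n2 <<< (11 : Nat))) pvMaxMask
    let s4' := s3
    let s3' := s2
    let s2' := s1
    let s1' := PySem.Int.mod n3 10 - before
    let ret' :=
      if i' > 3 then
        if ret.contains (s4', s3', s2', s1') then ret
        else ret.insert (s4', s3', s2', s1') (PySem.Int.mod n3 10)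
      else ret
    pvLoopA (times - 1) i' n3 s1' s2' s3' s4' ret'
  else ret
termination_by times.toNat
decreasing_by omega

def gen_sequences (number : Int) (times : Int) (all_sequences : List (Int × Int × Int × Int)) : List (Int × Int × Int × Int × Int) :=
  (pvLoopA times 0 number 0 0 0 0 PySem.Dict.empty).items.map
    (fun kv => (kv.1.1, kv.1.2.1, kv.1.2.2.1, kv.1.2.2.2, kv.2))

-- ===== PORT B =====
def pvStep (n : Int) : Int :=
  let a := PySem.Int.band (PySem.Int.bxor n (n <<< (6 : Nat))) pvMaxMask
  let b := PySem.Int.band (PySem.Int.bxor a (a >>> (5 : Nat))) pvMaxMask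
  PySem.Int.band (PySem.Int.bxor b (b <<< (11 : Nat))) pvMaxMask

def gen_sequences_alt (number : Int) (times : Int) (all_sequences : List (Int × Int × Int × Int)) : List (Int × Int × Int × Int × Int) :=
  -- Phase 1: the whole price series.
  let prices := ((List.range times.toNat).foldl
      (fun (st : Int × List Int) _ => let n := pvStep st.1; (n, st.2 ++ [PySem.Int.mod n 10]))
      (number, [PySem.Int.mod number 10])).2
  -- Phase 2: consecutive diffs, then a zip-built 4-wide window paired with the price at its end.
  let diffs := List.zipWith (fun a b => b - a) prices (prices.drop 1)
  let windows := List.zip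
      (List.zip diffs (List.zip (diffs.drop 1) (List.zip (diffs.drop 2) (diffs.drop 3))))
      (prices.drop 4)
  let ret := windows.foldl
      (fun (ret : PySem.Dict (Int × Int × Int × Int) Int) tp =>
        if ret.contains tp.1 then ret else ret.insert tp.1 tp.2)
      PySem.Dict.empty
  ret.items.map (fun kv => (kv.1.1, kv.1.2.1, kv.1.2.2.1, kv.1.2.2.2, kv.2))

-- ===== PRECONDITION & SPEC =====
def Spec_gen_sequences (number : Int) (times : Int) (all_sequences : List (Int × Int × Int × Int)) (out : List (Int × Int × Int × Int × Int)) : Prop := out = gen_sequences_alt number times all_sequences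
instance (number : Int) (times : Int) (all_sequences : List (Int × Int × Int × Int)) (out : List (Int × Int × Int × Int × Int)) : Decidable (Spec_gen_sequences number times all_sequences out) := by unfold Spec_gen_sequences; infer_instance

-- ===== CLAIM (what is proved, stated in full; the proofs are below) =====
def Claim_equal_gen_sequences : Prop := ∀ (number : Int) (times : Int) (all_sequences : List (Int × Int × Int × Int)), Dom_gen_sequences number times all_sequences → Spec_gen_sequences number times all_sequences (gen_sequences number times all_sequences)

-- ===== LEMMAS AND PROOFS =====

def pvNum (number : Int) : Nat → Int
  | 0 => number
  | k + 1 => pvStep (pvNum number k)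
def pvPr (number : Int) (k : Nat) : Int := PySem.Int.mod (pvNum number k) 10
def pvDf (number : Int) (k : Nat) : Int := pvPr number (k + 1) - pvPr number k
def pvUpd (ret : PySem.Dict (Int × Int × Int × Int) Int) (tp : (Int × Int × Int × Int) × Int) :
    PySem.Dict (Int × Int × Int × Int) Int :=
  if ret.contains tp.1 then ret else ret.insert tp.1 tp.2

def pvW (number : Int) (m : Nat) : List ((Int × Int × Int × Int) × Int) :=
  (List.range (m - 3)).map (fun k =>
    ((pvDf number k, pvDf number (1 + k), pvDf number (2 + k), pvDf number (3 + k)),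
     pvPr number (4 + k)))


lemma pvLoopA_spec (number : Int) : ∀ (n : Nat) (t : Int) (i : Nat) (s4 : Int)
    (ret : PySem.Dict (Int × Int × Int × Int) Int), t.toNat = n → 3 ≤ i →
    pvLoopA t (i : Int) (pvNum number i) (pvDf number (i - 1)) (pvDf number (i - 2)) (pvDf number (i - 3)) s4 ret
      = ((List.range n).map (fun k =>
          ((pvDf number (i - 3 + k), pvDf number (i - 2 + k), pvDf number (i - 1 + k), pvDf number (i + k)),
           pvPr number (i + 1 + k)))).foldl pvUpd ret := by
  intro n
  induction n with
  | zero =>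
    intro t i s4 ret ht hi
    rw [pvLoopA, dif_neg (by omega)]
    simp
  | succ n ih =>
    intro t i s4 ret ht hi
    rw [pvLoopA, dif_pos (by omega)]
    have hcond : ((i : Int) + 1 > 3) := by
      have : (3:Int) ≤ (i:Int) := by exact_mod_cast hi
      omega
    change pvLoopA (t - 1) ((i:Int) + 1) (pvNum number (i+1)) (pvDf number i) (pvDf number (i - 1)) (pvDf number (i - 2)) (pvDf number (i - 3))
      (if ((i:Int) + 1 > 3) then pvUpd ret ((pvDf number (i - 3), pvDf number (i - 2), pvDf number (i - 1), pvDf number i), pvPr number (i+1)) else ret) = _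
    rw [if_pos hcond]
    have hcast : ((i:Int) + 1) = ((i + 1 : Nat) : Int) := by push_cast; ring
    rw [hcast]
    have IH := ih (t - 1) (i + 1) (pvDf number (i - 3))
      (pvUpd ret ((pvDf number (i - 3), pvDf number (i - 2), pvDf number (i - 1), pvDf number i), pvPr number (i + 1)))
      (by omega) (by omega)
    have r1 : i + 1 - 1 = i := by omega
    have r2 : i + 1 - 2 = i - 1 := by omega
    have r3 : i + 1 - 3 = i - 2 := by omega
    rw [r1, r2, r3] at IH
    rw [IH, List.range_succ_eq_map, List.map_cons, List.map_map, List.foldl_cons]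
    have harg : ((pvDf number (i - 3 + 0), pvDf number (i - 2 + 0), pvDf number (i - 1 + 0), pvDf number (i + 0)), pvPr number (i + 1 + 0))
        = ((pvDf number (i - 3), pvDf number (i - 2), pvDf number (i - 1), pvDf number i), pvPr number (i + 1)) := by
      norm_num
    rw [harg]
    apply congrArg
    apply List.map_congr_left
    intro k _
    have e1 : i - 2 + k = i + 1 - 3 + k := by omega
    have e2 : i - 1 + k = i + 1 - 2 + k := by omega
    have e3 : i + k = i + 1 - 1 + k := by omega
    have e4 : Function.comp (fun k => ((pvDf number (i - 3 + k), pvDf number (i - 2 + k), pvDf number (i - 1 + k), pvDf number (i + k)), pvPr number (i + 1 + k))) Nat.succ k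
      = ((pvDf number (i - 3 + (k+1)), pvDf number (i - 2 + (k+1)), pvDf number (i - 1 + (k+1)), pvDf number (i + (k+1))), pvPr number (i + 1 + (k+1))) := rfl
    rw [e4]
    have g1 : i - 3 + (k + 1) = i + 1 - 3 + k := by omega
    have g2 : i - 2 + (k + 1) = i + 1 - 2 + k := by omega
    have g3 : i - 1 + (k + 1) = i + 1 - 1 + k := by omega
    have g4 : i + (k + 1) = i + 1 + k := by omega
    have g5 : i + 1 + (k + 1) = i + 1 + 1 + k := by omega
    rw [g1, g2, g3, g4, g5, r1, r2, r3]
lemma pvLoopA_eq_foldW (number times : Int) :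
    pvLoopA times 0 number 0 0 0 0 PySem.Dict.empty = (pvW number times.toNat).foldl pvUpd PySem.Dict.empty := by
  by_cases h1 : times ≤ 0
  · rw [pvLoopA, dif_neg (by omega)]
    have : times.toNat - 3 = 0 := by omega
    rw [pvW, this]; simp
  · rw [pvLoopA, dif_pos (by omega)]
    change pvLoopA (times - 1) 1 (pvNum number 1) (pvDf number 0) 0 0 0
      (if ((0:Int) + 1 > 3) then pvUpd PySem.Dict.empty ((0, 0, 0, pvDf number 0), pvPr number 1) else PySem.Dict.empty) = _
    rw [if_neg (by norm_num)]
    by_cases h2 : times ≤ 1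
    · rw [pvLoopA, dif_neg (by omega)]
      have : times.toNat - 3 = 0 := by omega
      rw [pvW, this]; simp
    · rw [pvLoopA, dif_pos (by omega)]
      change pvLoopA (times - 1 - 1) 2 (pvNum number 2) (pvDf number 1) (pvDf number 0) 0 0
        (if ((1:Int) + 1 > 3) then pvUpd PySem.Dict.empty ((0, 0, pvDf number 0, pvDf number 1), pvPr number 2) else PySem.Dict.empty) = _
      rw [if_neg (by norm_num)]
      by_cases h3 : times ≤ 2
      · rw [pvLoopA, dif_neg (by omega)]
        have : times.toNat - 3 = 0 := by omega
        rw [pvW, this]; simp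
      · rw [pvLoopA, dif_pos (by omega)]
        change pvLoopA (times - 1 - 1 - 1) 3 (pvNum number 3) (pvDf number 2) (pvDf number 1) (pvDf number 0) 0
          (if ((2:Int) + 1 > 3) then pvUpd PySem.Dict.empty ((0, pvDf number 0, pvDf number 1, pvDf number 2), pvPr number 3) else PySem.Dict.empty) = _
        rw [if_neg (by norm_num)]
        have S := pvLoopA_spec number (times - 1 - 1 - 1).toNat (times - 1 - 1 - 1) 3 0 PySem.Dict.empty rfl (by norm_num)
        norm_num at S
        rw [S]
        have hm : times.toNat - 1 - 1 - 1 = times.toNat - 3 := by omega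
        rw [hm, pvW]


lemma pvPrices_fold (number : Int) : ∀ (m k : Nat) (acc : List Int),
    (List.range m).foldl
      (fun (st : Int × List Int) _ => let n := pvStep st.1; (n, st.2 ++ [PySem.Int.mod n 10]))
      (pvNum number k, acc)
    = (pvNum number (k + m), acc ++ (List.range m).map (fun j => pvPr number (k + 1 + j))) := by
  intro m
  induction m with
  | zero => intro k acc; simp
  | succ m ih =>
    intro k acc
    rw [List.range_succ, List.foldl_append, ih, List.foldl_cons, List.foldl_nil]
    refine Prod.ext ?_ ?_
    · show pvStep (pvNum number (k + m)) = pvNum number (k + (m + 1))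
      rfl
    · show acc ++ _ ++ [PySem.Int.mod (pvStep (pvNum number (k + m))) 10]
        = acc ++ List.map (fun j => pvPr number (k + 1 + j)) (List.range m ++ [m])
      rw [List.map_append, List.map_singleton, ← List.append_assoc]
      have : PySem.Int.mod (pvStep (pvNum number (k + m))) 10 = pvPr number (k + 1 + m) := by
        have e : k + 1 + m = (k + m) + 1 := by omega
        rw [e]; rfl
      rw [this]

lemma pvPrices_eq (number : Int) (m : Nat) :
    ((List.range m).foldl
      (fun (st : Int × List Int) _ => let n := pvStep st.1; (n, st.2 ++ [PySem.Int.mod n 10]))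
      (number, [PySem.Int.mod number 10])).2
    = (List.range (m + 1)).map (pvPr number) := by
  have h0 : ((number, [PySem.Int.mod number 10]) : Int × List Int) = (pvNum number 0, [pvPr number 0]) := rfl
  rw [h0, pvPrices_fold number m 0 [pvPr number 0], List.range_succ_eq_map, List.map_cons, List.map_map]
  simp only [List.singleton_append, List.cons.injEq, true_and]
  apply List.map_congr_left
  intro k _
  have : (0:Nat) + 1 + k = Nat.succ k := by omega
  rw [this]; rfl

lemma pvWindows_eq (number : Int) (m : Nat) :
    (List.zip
      (List.zip
        (List.zipWith (fun a b => b - a) ((List.range (m + 1)).map (pvPr number)) (((List.range (m + 1)).map (pvPr number)).drop 1))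
        (List.zip ((List.zipWith (fun a b => b - a) ((List.range (m + 1)).map (pvPr number)) (((List.range (m + 1)).map (pvPr number)).drop 1)).drop 1)
          (List.zip ((List.zipWith (fun a b => b - a) ((List.range (m + 1)).map (pvPr number)) (((List.range (m + 1)).map (pvPr number)).drop 1)).drop 2)
            ((List.zipWith (fun a b => b - a) ((List.range (m + 1)).map (pvPr number)) (((List.range (m + 1)).map (pvPr number)).drop 1)).drop 3))))
      (((List.range (m + 1)).map (pvPr number)).drop 4))
    = pvW number m := by
  apply List.ext_getElem
  · simp [pvW]
    omega
  · intro k h1 h2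
    simp [pvW, List.getElem_zip, List.getElem_zipWith, List.getElem_drop, List.getElem_map, List.getElem_range, pvDf, pvPr]
    ring_nf

lemma pvAlt_eq_foldW (number times : Int) (all_sequences : List (Int × Int × Int × Int)) :
    gen_sequences_alt number times all_sequences
      = ((pvW number times.toNat).foldl pvUpd PySem.Dict.empty).items.map
          (fun kv => (kv.1.1, kv.1.2.1, kv.1.2.2.1, kv.1.2.2.2, kv.2)) := by
  simp only [gen_sequences_alt]
  rw [pvPrices_eq number times.toNat, pvWindows_eq]
  rfl

-- ===== VERDICT (by name: the statement is the Claim_ definition above) =====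
theorem gen_sequences_spec : Claim_equal_gen_sequences := by
  intro number times all_sequences _
  unfold Spec_gen_sequences
  rw [pvAlt_eq_foldW, gen_sequences, pvLoopA_eq_foldW]
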